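-- pv_equiv track=rewrite | github.com/wrjang96/Programmers_code | ProL2 - 괄호변환.py | check_right_str
-- ===== SOURCE A (Python) =====
-- def check_right_str(arr):
--     stack = 0
--     return_value = True
--     for i in range(len(arr)):
--         if arr[i] == ")":
--             stack += -1
--         elif arr[i] == "(":
--             stack += 1
--         if stack < 0:
--             return_value = False
--     return return_value
-- ===== SOURCE B (Python) =====
-- def check_right_str(arr):
--     deltas = [1 if c == "(" else -1 if c == ")" else 0 for c in arr]
--     balances = []
--     total = 0
--     for d in deltas:
--         total += d
--         balances.append(total)
--     return min([0] + balances) >= 0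
-- ===== Notes on version B (the rewrite author's own statement) =====
-- stated objective: simpler
-- what changed: Replaces the single-pass accumulator-with-sticky-flag by a two-phase table form: map each char to a delta, build the running prefix-balance list, then reduce it with min and compare to 0.
import Mathlib
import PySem

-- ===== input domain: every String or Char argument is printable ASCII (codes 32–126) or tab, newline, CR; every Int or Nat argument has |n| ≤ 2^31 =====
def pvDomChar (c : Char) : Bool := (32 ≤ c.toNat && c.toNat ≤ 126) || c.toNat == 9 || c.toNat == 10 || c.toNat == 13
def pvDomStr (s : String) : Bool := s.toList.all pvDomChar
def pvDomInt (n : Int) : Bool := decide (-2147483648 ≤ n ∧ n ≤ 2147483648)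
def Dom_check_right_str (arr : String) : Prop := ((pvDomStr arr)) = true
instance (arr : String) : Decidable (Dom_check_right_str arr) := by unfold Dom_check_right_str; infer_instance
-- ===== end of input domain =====

-- B replaces A's single-pass accumulator-with-sticky-flag by a two-phase form: map chars to deltas, build the running prefix-balance list, then take its minimum and compare to 0 (simpler decomposition, same O(n) cost).


-- ===== PORT A =====
-- literal port: fold over the characters with state (stack, return_value)
def check_right_str (arr : String) : Bool :=
  (arr.toList.foldl
    (fun (st : Int × Bool) c =>
      let s := if c = ')' then st.1 - 1 else if c = '(' then st.1 + 1 else st.1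
      (s, if s < 0 then false else st.2))
    (0, true)).2

-- ===== PORT B =====
def pvDelta (c : Char) : Int := if c = '(' then 1 else if c = ')' then -1 else 0

-- the accumulation loop of Source B: running totals of the delta list
def pvAccum : List Int → Int → List Int
  | [], _ => []
  | d :: t, total => (total + d) :: pvAccum t (total + d)

def check_right_str_alt (arr : String) : Bool :=
  let deltas := arr.toList.map pvDelta
  let balances := pvAccum deltas 0
  decide (0 ≤ balances.foldl min (0 : Int))   -- min([0] + balances) ≥ 0

-- ===== PRECONDITION & SPEC =====
def Spec_check_right_str (arr : String) (out : Bool) : Prop := out = check_right_str_alt arr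
instance (arr : String) (out : Bool) : Decidable (Spec_check_right_str arr out) := by unfold Spec_check_right_str; infer_instance

-- ===== CLAIM (what is proved, stated in full; the proofs are below) =====
def Claim_equal_check_right_str : Prop := ∀ (arr : String), Dom_check_right_str arr → Spec_check_right_str arr (check_right_str arr)

-- ===== LEMMAS AND PROOFS =====
-- common characterisation: every prefix balance starting from s is ≥ 0
def pvAllPref : Int → List Char → Bool
  | _, [] => true
  | s, c :: t => (decide (0 ≤ s + pvDelta c)) && pvAllPref (s + pvDelta c) t

theorem pvStepA (s : Int) (c : Char) :
    (if c = ')' then s - 1 else if c = '(' then s + 1 else s) = s + pvDelta c := by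
  by_cases h1 : c = ')'
  · subst h1; simp [pvDelta]; omega
  · by_cases h2 : c = '('
    · subst h2; simp [pvDelta]
    · simp [pvDelta, h1, h2]

theorem pvAsideChar (l : List Char) : ∀ (s : Int) (rv : Bool),
    (l.foldl
      (fun (st : Int × Bool) c =>
        let s := if c = ')' then st.1 - 1 else if c = '(' then st.1 + 1 else st.1
        (s, if s < 0 then false else st.2))
      (s, rv)).2 = (rv && pvAllPref s l) := by
  induction l with
  | nil => intro s rv; simp [pvAllPref]
  | cons c t ih =>
    intro s rv
    simp only [List.foldl_cons, pvAllPref]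
    show (List.foldl _ (if c = ')' then s - 1 else if c = '(' then s + 1 else s,
        if (if c = ')' then s - 1 else if c = '(' then s + 1 else s) < 0 then false else rv) t).2 = _
    rw [pvStepA, ih]
    by_cases h : s + pvDelta c < 0
    · have : ¬ (0 ≤ s + pvDelta c) := by omega
      simp [h, this]
    · have : (0 ≤ s + pvDelta c) := by omega
      simp [h, this]

theorem pvBsideChar (l : List Char) : ∀ (s m : Int),
    (0 ≤ (pvAccum (l.map pvDelta) s).foldl min m) ↔ (0 ≤ m ∧ pvAllPref s l = true) := by
  induction l with
  | nil => intro s m; simp [pvAccum, pvAllPref]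
  | cons c t ih =>
    intro s m
    simp only [List.map_cons, pvAccum, List.foldl_cons, pvAllPref]
    rw [ih]
    simp [and_assoc]

-- ===== VERDICT (by name: the statement is the Claim_ definition above) =====
theorem check_right_str_spec : Claim_equal_check_right_str := by
  intro arr _
  unfold Spec_check_right_str check_right_str check_right_str_alt
  rw [pvAsideChar]
  simp only [Bool.true_and]
  rcases hb : pvAllPref 0 arr.toList with _ | _
  · have := (not_iff_not.mpr (pvBsideChar arr.toList 0 0)).mpr (by simp [hb])
    simp [this]
  · exact (decide_eq_true ((pvBsideChar arr.toList 0 0).mpr ⟨le_refl 0, hb⟩)).symm
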